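-- pv_equiv track=rewrite | github.com/Huuuuugh/BEON-data-diagnosis | run_simple.py | format_output_ymd
-- ===== SOURCE A (Python) =====
-- def format_output_ymd(dates_by_ymd):
--     if not dates_by_ymd:
--         return None
--
--     year_month_days = {}
--     for year, month, day in dates_by_ymd:
--         key = (year, month)
--         if key not in year_month_days:
--             year_month_days[key] = set()
--         year_month_days[key].add(day)
--
--     if not year_month_days:
--         return None
--
--     result_parts = []
--     for (year, month) in sorted(year_month_days.keys()):
--         days = sorted(list(year_month_days[(year, month)]))
--         days_str = '、'.join(map(str, days))
--         result_parts.append(f"{year}年{month}月：{days_str}")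
--
--     return '\n'.join(result_parts)
-- ===== SOURCE B (Python) =====
-- def format_output_ymd(dates_by_ymd):
--     if not dates_by_ymd:
--         return None
--     triples = sorted(dates_by_ymd)
--     lines = []
--     i = 0
--     n = len(triples)
--     while i < n:
--         year, month, _ = triples[i]
--         days = []
--         while i < n and triples[i][0] == year and triples[i][1] == month:
--             d = triples[i][2]
--             if not days or days[-1] != d:
--                 days.append(d)
--             i += 1
--         lines.append(f"{year}年{month}月：{'、'.join(map(str, days))}")
--     return '\n'.join(lines)
-- ===== Notes on version B (the rewrite author's own statement) =====
-- stated objective: alternative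
-- what changed: A builds a dict of day-sets keyed by (year, month) and then sorts the keys and each day-set separately; B sorts the whole triple list once lexicographically and emits the lines in a single grouping pass, deduplicating days by adjacency instead of with sets.
import Mathlib
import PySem

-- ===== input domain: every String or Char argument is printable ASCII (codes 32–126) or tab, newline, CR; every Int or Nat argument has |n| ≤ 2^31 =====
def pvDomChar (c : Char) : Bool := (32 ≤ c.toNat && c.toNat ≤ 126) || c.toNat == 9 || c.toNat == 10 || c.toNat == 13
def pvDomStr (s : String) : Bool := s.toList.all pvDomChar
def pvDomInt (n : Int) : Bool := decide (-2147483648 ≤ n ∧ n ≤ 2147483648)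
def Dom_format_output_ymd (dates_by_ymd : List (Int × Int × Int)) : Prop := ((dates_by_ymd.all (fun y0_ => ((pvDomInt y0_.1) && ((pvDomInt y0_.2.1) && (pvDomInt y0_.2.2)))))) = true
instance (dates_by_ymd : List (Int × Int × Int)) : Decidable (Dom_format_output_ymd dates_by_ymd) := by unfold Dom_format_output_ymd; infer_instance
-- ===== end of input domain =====

-- B re-implements A (dict of day-sets, then sorted keys and per-key sorts) as one sort of the
-- whole triple list followed by a single grouping pass with adjacent-duplicate day skipping;
-- objective: idiomatic/alternative single-pass-after-sort structure, same exact output.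

-- ===== PORT A =====
-- f"{year}年{month}月：{days_str}" of A (string building; small literals, plain concatenation)
def pvLineA (ym : Int × Int) (days_str : String) : String :=
  PySem.Int.toStr ym.1 ++ "年" ++ PySem.Int.toStr ym.2 ++ "月：" ++ days_str

-- the dict-building loop of A: conditional fresh-empty-set insert, then set.add of the day
def pvBuildDict (l : List (Int × Int × Int)) : PySem.Dict (Int × Int) (PySem.Set Int) :=
  l.foldl (fun d t =>
    let key : Int × Int := (t.1, t.2.1)
    let d := if d.contains key then d else d.insert key PySem.Set.empty
    d.modify key PySem.Set.empty (fun s => PySem.Set.add s t.2.2)) PySem.Dict.empty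

def format_output_ymd (dates_by_ymd : List (Int × Int × Int)) : Option String :=
  if dates_by_ymd = [] then none
  else
    let d := pvBuildDict dates_by_ymd
    if d.items = [] then none
    else
      -- sorted(keys): tuples compare lexicographically; toLex is that order (exact)
      let result_parts := (PySem.List.sorted d.keys (fun k => toLex k) false).foldl
        (fun parts k =>
          let days := PySem.List.sorted (d.getD k PySem.Set.empty) (fun x => x) false
          parts ++ [pvLineA k (PySem.Str.join "、" (days.map PySem.Int.toStr))]) []
      some (PySem.Str.join "\n" result_parts)

-- ===== PORT B =====
-- B's grouping pass over the sorted triples: consume one (year, month) run (inner while loop: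
-- append day when it differs from the last appended), emit its line, continue on the rest
def pvChunk : List (Int × Int × Int) → List String
  | [] => []
  | t :: rest =>
    let k : Int × Int := (t.1, t.2.1)
    let grp := t :: rest.takeWhile (fun u => (u.1, u.2.1) = k)
    let days := grp.foldl
      (fun days u => if days = [] ∨ days.getLast? ≠ some u.2.2 then days ++ [u.2.2] else days) []
    (PySem.Int.toStr k.1 ++ "年" ++ PySem.Int.toStr k.2 ++ "月："
        ++ PySem.Str.join "、" (days.map PySem.Int.toStr))
      :: pvChunk (rest.dropWhile (fun u => (u.1, u.2.1) = k))
termination_by l => l.length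
decreasing_by
  simp only [List.length_cons]
  exact Nat.lt_succ_of_le (List.length_dropWhile_le _ _)

def format_output_ymd_alt (dates_by_ymd : List (Int × Int × Int)) : Option String :=
  if dates_by_ymd = [] then none
  else
    -- sorted(triples): lexicographic tuple comparison, ported with the nested toLex key (exact)
    some (PySem.Str.join "\n"
      (pvChunk (PySem.List.sorted dates_by_ymd
        (fun t => toLex (t.1, toLex (t.2.1, t.2.2))) false)))

-- ===== PRECONDITION & SPEC =====
def Spec_format_output_ymd (dates_by_ymd : List (Int × Int × Int)) (out : Option String) : Prop := out = format_output_ymd_alt dates_by_ymd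
instance (dates_by_ymd : List (Int × Int × Int)) (out : Option String) : Decidable (Spec_format_output_ymd dates_by_ymd out) := by unfold Spec_format_output_ymd; infer_instance

-- ===== CLAIM (what is proved, stated in full; the proofs are below) =====
def Claim_equal_format_output_ymd : Prop := ∀ (dates_by_ymd : List (Int × Int × Int)), Dom_format_output_ymd dates_by_ymd → Spec_format_output_ymd dates_by_ymd (format_output_ymd dates_by_ymd)

-- ===== LEMMAS AND PROOFS =====

-- key of a triple, as A's dict uses it
def pvKey (t : Int × Int × Int) : Int × Int := (t.1, t.2.1)

-- the canonical form both programs compute: strictly sorted distinct keys, and per key the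
-- strictly sorted distinct days, formatted
def pvCanon (l : List (Int × Int × Int)) : List String :=
  (PySem.List.sorted (PySem.Set.ofList (l.map pvKey)) (fun k => toLex k) false).map
    (fun k => pvLineA k (PySem.Str.join "、"
      ((PySem.List.sorted
          (PySem.Set.ofList ((l.filter (fun t => pvKey t = k)).map (fun t => t.2.2)))
          (fun x => x) false).map PySem.Int.toStr)))

-- A's dict-building step
def pvStep (d : PySem.Dict (Int × Int) (PySem.Set Int)) (t : Int × Int × Int) :
    PySem.Dict (Int × Int) (PySem.Set Int) :=
  let key : Int × Int := (t.1, t.2.1)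
  let d := if d.contains key then d else d.insert key PySem.Set.empty
  d.modify key PySem.Set.empty (fun s => PySem.Set.add s t.2.2)

theorem pvBuildDict_eq (l : List (Int × Int × Int)) : pvBuildDict l = l.foldl pvStep PySem.Dict.empty := rfl

theorem pvStep_getD (d : PySem.Dict (Int × Int) (PySem.Set Int)) (t : Int × Int × Int) (k : Int × Int) :
    (pvStep d t).getD k PySem.Set.empty
      = if pvKey t = k then PySem.Set.add (d.getD k PySem.Set.empty) t.2.2
        else d.getD k PySem.Set.empty := by
  have hkey : pvKey t = (t.1, t.2.1) := rfl
  unfold pvStep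
  simp only []
  rw [PySem.Dict.getD_modify]
  by_cases hk : k = (t.1, t.2.1)
  · subst hk
    rw [if_pos rfl, if_pos hkey]
    have hd : (if d.contains (t.1, t.2.1) then d else d.insert (t.1, t.2.1) PySem.Set.empty).getD
        (t.1, t.2.1) PySem.Set.empty = d.getD (t.1, t.2.1) PySem.Set.empty := by
      by_cases hc : d.contains (t.1, t.2.1) = true
      · rw [if_pos hc]
      · rw [if_neg hc, PySem.Dict.getD_insert, if_pos rfl,
          PySem.Dict.getD_of_not_contains d _ (by simpa using hc)]
    rw [hd]
  · rw [if_neg hk, if_neg (fun h : pvKey t = k => hk (h.symm.trans hkey))]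
    by_cases hc : d.contains (t.1, t.2.1) = true
    · rw [if_pos hc]
    · rw [if_neg hc, PySem.Dict.getD_insert, if_neg hk]

theorem pvStep_keys (d : PySem.Dict (Int × Int) (PySem.Set Int)) (t : Int × Int × Int) :
    (pvStep d t).keys = PySem.Set.add d.keys (pvKey t) := by
  have hkey : pvKey t = (t.1, t.2.1) := rfl
  unfold pvStep
  simp only []
  rw [PySem.Dict.keys_modify]
  by_cases hc : d.contains (t.1, t.2.1) = true
  · rw [if_pos hc, PySem.Dict.keys_insert_of_contains _ _ hc]
    have hm : (t.1, t.2.1) ∈ d.keys := (PySem.Dict.contains_iff_mem_keys d _).mp hc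
    simp [PySem.Set.add, PySem.Set.contains, hm, hkey]
  · rw [if_neg (by simp [hc])]
    rw [PySem.Dict.keys_insert_of_contains _ _ (PySem.Dict.contains_insert_self d _ _)]
    rw [PySem.Dict.keys_insert_of_not_contains d _ (by simpa using hc)]
    have hm : (t.1, t.2.1) ∉ d.keys := fun hmem =>
      by simp [(PySem.Dict.contains_iff_mem_keys d _).mpr hmem] at hc
    simp [PySem.Set.add, PySem.Set.contains, hm, hkey]

theorem pv_fold_getD (l : List (Int × Int × Int)) (d : PySem.Dict (Int × Int) (PySem.Set Int)) (k : Int × Int) :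
    (l.foldl pvStep d).getD k PySem.Set.empty
      = ((l.filter (fun t => pvKey t = k)).map (fun t => t.2.2)).foldl PySem.Set.add
          (d.getD k PySem.Set.empty) := by
  induction l generalizing d with
  | nil => rfl
  | cons t l ih =>
    rw [List.foldl_cons, ih, pvStep_getD]
    by_cases hk : pvKey t = k
    · simp [hk]
    · simp [hk]

theorem pv_fold_keys (l : List (Int × Int × Int)) (d : PySem.Dict (Int × Int) (PySem.Set Int)) :
    (l.foldl pvStep d).keys = PySem.Set.update d.keys (l.map pvKey) := by
  induction l generalizing d with
  | nil => rfl
  | cons t l ih =>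
    rw [List.foldl_cons, ih, pvStep_keys, List.map_cons]
    rfl

theorem pvBuildDict_keys (l : List (Int × Int × Int)) :
    (pvBuildDict l).keys = PySem.Set.ofList (l.map pvKey) := by
  rw [pvBuildDict_eq, pv_fold_keys, PySem.Set.ofList_eq_foldl]
  rfl

theorem pvBuildDict_getD (l : List (Int × Int × Int)) (k : Int × Int) :
    (pvBuildDict l).getD k PySem.Set.empty
      = PySem.Set.ofList ((l.filter (fun t => pvKey t = k)).map (fun t => t.2.2)) := by
  rw [pvBuildDict_eq, pv_fold_getD, PySem.Dict.getD_empty, PySem.Set.ofList_eq_foldl]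
  rfl

-- A computes the canonical form
theorem pvA_eq (l : List (Int × Int × Int)) (h : l ≠ []) :
    format_output_ymd l = some (PySem.Str.join "\n" (pvCanon l)) := by
  obtain ⟨t, rest, rfl⟩ := List.exists_cons_of_ne_nil h
  unfold format_output_ymd
  rw [if_neg h]
  simp only []
  have hmem : pvKey t ∈ (pvBuildDict (t :: rest)).keys := by
    rw [pvBuildDict_keys]
    exact (PySem.Set.mem_ofList _ _).mpr (by simp)
  have hitems : ¬ (pvBuildDict (t :: rest)).items = [] := by
    intro h0
    rw [show (pvBuildDict (t :: rest)).keys = (pvBuildDict (t :: rest)).items.map (fun p => p.1)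
      from rfl, h0] at hmem
    simp at hmem
  rw [if_neg hitems]
  congr 1
  rw [PySem.List.foldl_append_singleton_eq_map
    (f := fun k => pvLineA k (PySem.Str.join "、"
      ((PySem.List.sorted ((pvBuildDict (t :: rest)).getD k PySem.Set.empty)
        (fun x => x) false).map PySem.Int.toStr)))]
  rw [List.nil_append]
  unfold pvCanon
  rw [pvBuildDict_keys]
  congr 1
  refine List.map_congr_left (fun k _ => ?_)
  rw [pvBuildDict_getD]

-- sorting a duplicate-free list by an injective key is strictly increasing in the key
theorem pv_sorted_strict {α κ : Type} [LinearOrder κ] (s : List α) (key : α → κ)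
    (hs : s.Nodup) (hinj : Function.Injective key) :
    (PySem.List.sorted s key false).Pairwise (fun a b => key a < key b) := by
  have h1 := PySem.List.sorted_pairwise s key
  have h2 : (PySem.List.sorted s key false).Nodup :=
    ((PySem.List.sorted_perm s key false).symm).nodup hs
  exact (h1.and h2).imp
    (fun hab => lt_of_le_of_ne hab.1 (fun heq => hab.2 (hinj heq)))

-- canonical form only depends on the multiset of triples
-- Set.ofList of a rearrangement is a rearrangement
theorem pv_ofList_perm {α : Type} [BEq α] [LawfulBEq α] (xs ys : List α) (h : xs.Perm ys) :
    (PySem.Set.ofList xs).Perm (PySem.Set.ofList ys) :=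
  (List.perm_ext_iff_of_nodup (PySem.Set.nodup_ofList xs) (PySem.Set.nodup_ofList ys)).mpr
    (fun a => by simp [PySem.Set.mem_ofList, h.mem_iff])

theorem pvCanon_perm (l l' : List (Int × Int × Int)) (h : l.Perm l') : pvCanon l = pvCanon l' := by
  unfold pvCanon
  rw [PySem.List.sorted_eq_sorted_of_perm (κ := Lex (Int × Int)) _ _ (fun k => toLex k)
    (fun a b hh => hh) (pv_ofList_perm _ _ (h.map pvKey))]
  refine List.map_congr_left (fun k _ => ?_)
  rw [PySem.List.sorted_eq_sorted_of_perm (κ := Int) _ _ (fun x => x) (fun a b hh => hh)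
    (pv_ofList_perm _ _ ((h.filter (fun t => decide (pvKey t = k))).map (fun t => t.2.2)))]

-- B's adjacent-dedup loop, recursively: pvDDP p ds keeps the run heads, last emitted = p
def pvDDP (p : Int) : List Int → List Int
  | [] => []
  | x :: xs => if x = p then pvDDP p xs else x :: pvDDP x xs

theorem pv_foldl_dedup (ds : List Int) (acc : List Int) (p : Int) :
    ds.foldl (fun days u => if days = [] ∨ days.getLast? ≠ some u then days ++ [u] else days) (acc ++ [p])
      = acc ++ [p] ++ pvDDP p ds := by
  induction ds generalizing acc p with
  | nil => simp [pvDDP]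
  | cons x xs ih =>
    rw [List.foldl_cons]
    by_cases hx : x = p
    · subst hx
      rw [if_neg (by simp)]
      rw [ih, pvDDP, if_pos rfl]
    · rw [if_pos (Or.inr (by simp; exact fun h => hx h.symm))]
      rw [show acc ++ [p] ++ [x] = (acc ++ [p]) ++ [x] from rfl, ih]
      simp [pvDDP, if_neg hx]

theorem pvDDP_spec (p : Int) (ds : List Int) (h1 : ds.Pairwise (· ≤ ·)) (h2 : ∀ y ∈ ds, p ≤ y) :
    (∀ y, y ∈ pvDDP p ds ↔ y ∈ ds ∧ y ≠ p) ∧ (pvDDP p ds).Pairwise (· < ·)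
      ∧ (∀ y ∈ pvDDP p ds, p < y) := by
  induction ds generalizing p with
  | nil => simp [pvDDP]
  | cons x xs ih =>
    obtain ⟨hxall, hxs⟩ := List.pairwise_cons.mp h1
    by_cases hx : x = p
    · subst hx
      rw [pvDDP, if_pos rfl]
      obtain ⟨hm, hp, hgt⟩ := ih x hxs hxall
      refine ⟨fun y => ?_, hp, hgt⟩
      rw [hm y]
      constructor
      · exact fun ⟨hy1, hy2⟩ => ⟨List.mem_cons_of_mem _ hy1, hy2⟩
      · rintro ⟨hy1, hy2⟩
        rcases List.mem_cons.mp hy1 with rfl | hy1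
        · exact absurd rfl hy2
        · exact ⟨hy1, hy2⟩
    · have hpx : p < x := lt_of_le_of_ne (h2 x (List.mem_cons_self)) (fun h => hx h.symm)
      rw [pvDDP, if_neg hx]
      obtain ⟨hm, hp, hgt⟩ := ih x hxs hxall
      refine ⟨fun y => ?_, List.pairwise_cons.mpr ⟨fun y hy => hgt y hy, hp⟩, ?_⟩
      · constructor
        · intro hy
          rcases List.mem_cons.mp hy with rfl | hy
          · exact ⟨List.mem_cons_self, fun h => hx h⟩
          · obtain ⟨hy1, _⟩ := (hm y).mp hy
            exact ⟨List.mem_cons_of_mem _ hy1, ne_of_gt (lt_of_lt_of_le hpx (hxall y hy1))⟩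
        · rintro ⟨hy1, hy2⟩
          rcases List.mem_cons.mp hy1 with rfl | hy1
          · exact List.mem_cons_self
          · by_cases hyx : y = x
            · subst hyx; exact List.mem_cons_self
            · exact List.mem_cons_of_mem _ ((hm y).mpr ⟨hy1, hyx⟩)
      · intro y hy
        rcases List.mem_cons.mp hy with rfl | hy
        · exact hpx
        · exact lt_trans hpx (hgt y hy)

-- the dedup loop over a nondecreasing list is sorted(set(ds))
theorem pv_dedup_eq_sorted_set (ds : List Int) (h : ds.Pairwise (· ≤ ·)) :
    ds.foldl (fun days u => if days = [] ∨ days.getLast? ≠ some u then days ++ [u] else days) []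
      = PySem.List.sorted (PySem.Set.ofList ds) (fun x => x) false := by
  cases ds with
  | nil => rfl
  | cons x xs =>
    obtain ⟨hxall, hxs⟩ := List.pairwise_cons.mp h
    rw [List.foldl_cons, if_pos (Or.inl rfl), List.nil_append,
      show [x] = [] ++ [x] from rfl, pv_foldl_dedup, List.nil_append]
    obtain ⟨hm, hp, hgt⟩ := pvDDP_spec x xs hxs hxall
    refine (PySem.List.sorted_eq_of_perm_of_pairwise_lt _ _ _ ?_ ?_).symm
    · refine (List.perm_ext_iff_of_nodup ?_ (PySem.Set.nodup_ofList _)).mpr (fun y => ?_)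
      · have hlt : (x :: pvDDP x xs).Pairwise (· < ·) :=
          List.pairwise_cons.mpr ⟨fun y hy => hgt y hy, hp⟩
        exact hlt.imp (fun hab => ne_of_lt hab)
      · rw [PySem.Set.mem_ofList]
        constructor
        · intro hy
          rcases List.mem_cons.mp hy with rfl | hy
          · exact List.mem_cons_self
          · exact List.mem_cons_of_mem _ ((hm y).mp hy).1
        · intro hy
          rcases List.mem_cons.mp hy with rfl | hy
          · exact List.mem_cons_self
          · by_cases hyx : y = x
            · subst hyx; exact List.mem_cons_self
            · exact List.mem_cons_of_mem _ ((hm y).mpr ⟨hy, hyx⟩)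
    · exact List.pairwise_cons.mpr ⟨fun y hy => hgt y hy, hp⟩

-- lex comparison of full date triples refines lex comparison of their (year, month) keys
theorem pv_le_key (a b : Int × Int × Int)
    (h : toLex (a.1, toLex (a.2.1, a.2.2)) ≤ toLex (b.1, toLex (b.2.1, b.2.2))) :
    toLex (pvKey a) ≤ toLex (pvKey b) := by
  rw [Prod.Lex.le_iff] at h ⊢
  simp only [ofLex_toLex] at h ⊢
  rcases h with h1 | ⟨h1, h2⟩
  · exact Or.inl h1
  · rw [Prod.Lex.le_iff] at h2
    simp only [ofLex_toLex] at h2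
    rcases h2 with h2 | ⟨h2, _⟩
    · exact Or.inr ⟨h1, le_of_lt h2⟩
    · exact Or.inr ⟨h1, le_of_eq h2⟩

-- within one (year, month) key, the triple order is the day order
theorem pv_le_day (a b : Int × Int × Int)
    (h : toLex (a.1, toLex (a.2.1, a.2.2)) ≤ toLex (b.1, toLex (b.2.1, b.2.2)))
    (hk : pvKey a = pvKey b) : a.2.2 ≤ b.2.2 := by
  have h1 : a.1 = b.1 := by
    have := congrArg Prod.fst hk; simpa [pvKey] using this
  have h2 : a.2.1 = b.2.1 := by
    have := congrArg Prod.snd hk; simpa [pvKey] using this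
  rw [Prod.Lex.le_iff] at h
  simp only [ofLex_toLex] at h
  rcases h with h' | ⟨_, h'⟩
  · omega
  · rw [Prod.Lex.le_iff] at h'
    simp only [ofLex_toLex] at h'
    rcases h' with h' | ⟨_, h'⟩
    · omega
    · exact h'

-- a fold over triples that only reads the day component is the fold over the day list
theorem pv_foldl_tripleday (g : List (Int × Int × Int)) (acc : List Int) :
    g.foldl (fun days u => if days = [] ∨ days.getLast? ≠ some u.2.2 then days ++ [u.2.2] else days) acc
      = (g.map (fun u => u.2.2)).foldl
          (fun days d => if days = [] ∨ days.getLast? ≠ some d then days ++ [d] else days) acc := by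
  induction g generalizing acc with
  | nil => rfl
  | cons x xs ih => simp only [List.foldl_cons, List.map_cons, ih]

-- B's grouping pass on a key3-sorted list computes the canonical form
theorem pvChunk_eq (L : List (Int × Int × Int))
    (h : L.Pairwise (fun a b => toLex (a.1, toLex (a.2.1, a.2.2)) ≤ toLex (b.1, toLex (b.2.1, b.2.2)))) :
    pvChunk L = pvCanon L := by
  match L with
  | [] =>
    rw [pvChunk]; rfl
  | t :: rest =>
    obtain ⟨hk3, hrest⟩ := List.pairwise_cons.mp h
    have htW : ∀ u ∈ rest.takeWhile (fun u => decide ((u.1, u.2.1) = (t.1, t.2.1))),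
        pvKey u = (t.1, t.2.1) := fun u hu => by
      have := List.mem_takeWhile_imp hu
      simpa [pvKey] using this
    have hsplit : rest = rest.takeWhile (fun u => decide ((u.1, u.2.1) = (t.1, t.2.1)))
        ++ rest.dropWhile (fun u => decide ((u.1, u.2.1) = (t.1, t.2.1))) :=
      (List.takeWhile_append_dropWhile).symm
    have hdWsub : List.Sublist
        (rest.dropWhile (fun u => decide ((u.1, u.2.1) = (t.1, t.2.1)))) rest :=
      List.dropWhile_sublist _
    have hdWsorted := List.Pairwise.sublist hdWsub hrest
    have hdWne : ∀ u ∈ rest.dropWhile (fun u => decide ((u.1, u.2.1) = (t.1, t.2.1))),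
        pvKey u ≠ (t.1, t.2.1) := by
      cases hdw : rest.dropWhile (fun u => decide ((u.1, u.2.1) = (t.1, t.2.1))) with
      | nil => simp
      | cons u0 du =>
        have hne0 : rest.dropWhile (fun u => decide ((u.1, u.2.1) = (t.1, t.2.1))) ≠ [] := by
          rw [hdw]; simp
        have hp0 := List.head?_dropWhile_not
          (fun u : Int × Int × Int => decide ((u.1, u.2.1) = (t.1, t.2.1))) rest
        rw [hdw] at hp0
        simp only [List.head?_cons] at hp0
        have hk0 : pvKey u0 ≠ (t.1, t.2.1) := by simpa [pvKey] using hp0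
        intro u hu
        rcases List.mem_cons.mp hu with rfl | hu
        · exact hk0
        · intro heq
          apply hk0
          have hu0r : u0 ∈ rest := hdWsub.subset (by rw [hdw]; exact List.mem_cons_self)
          have hur : u ∈ rest := hdWsub.subset (by rw [hdw]; exact List.mem_cons_of_mem _ hu)
          have h1 : toLex (pvKey t) ≤ toLex (pvKey u0) := pv_le_key _ _ (hk3 u0 hu0r)
          have h2 : toLex (pvKey u0) ≤ toLex (pvKey u) :=
            pv_le_key _ _ (List.rel_of_pairwise_cons (hdw ▸ hdWsorted) hu)
          have hkt : pvKey t = (t.1, t.2.1) := rfl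
          have : toLex (pvKey u0) = toLex ((t.1, t.2.1) : Int × Int) :=
            le_antisymm (heq ▸ h2) (hkt ▸ h1)
          exact congrArg ofLex this
    -- (a) the sorted distinct keys of t :: rest decompose as k0 :: (keys of the remainder)
    have hkeys : PySem.List.sorted (PySem.Set.ofList ((t :: rest).map pvKey)) (fun k => toLex k) false
        = (t.1, t.2.1) :: PySem.List.sorted (PySem.Set.ofList
            ((rest.dropWhile (fun u => decide ((u.1, u.2.1) = (t.1, t.2.1)))).map pvKey))
            (fun k => toLex k) false := by
      refine PySem.List.sorted_eq_of_perm_of_pairwise_lt _ _ _ ?_ ?_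
      · refine (List.perm_ext_iff_of_nodup ?_ (PySem.Set.nodup_ofList _)).mpr ?_
        · refine List.nodup_cons.mpr ⟨?_, ?_⟩
          · intro hmem
            rw [PySem.List.mem_sorted, PySem.Set.mem_ofList] at hmem
            obtain ⟨u, hu, hku⟩ := List.mem_map.mp hmem
            exact hdWne u hu hku
          · exact ((PySem.List.sorted_perm _ _ false).symm).nodup (PySem.Set.nodup_ofList _)
        · intro y
          simp only [List.mem_cons, PySem.List.mem_sorted, PySem.Set.mem_ofList, List.mem_map]
          constructor
          · rintro (rfl | ⟨u, hu, rfl⟩)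
            · exact ⟨t, Or.inl rfl, rfl⟩
            · exact ⟨u, Or.inr (hdWsub.subset hu), rfl⟩
          · rintro ⟨u, hu, rfl⟩
            rcases hu with rfl | hu
            · exact Or.inl rfl
            · rw [hsplit] at hu
              rcases List.mem_append.mp hu with hu | hu
              · exact Or.inl (htW u hu)
              · exact Or.inr ⟨u, hu, rfl⟩
      · refine List.pairwise_cons.mpr ⟨?_, ?_⟩
        · intro y hy
          rw [PySem.List.mem_sorted, PySem.Set.mem_ofList] at hy
          obtain ⟨u, hu, rfl⟩ := List.mem_map.mp hy
          exact lt_of_le_of_ne (pv_le_key t u (hk3 u (hdWsub.subset hu)))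
            (fun he => hdWne u hu (congrArg ofLex he).symm)
        · exact pv_sorted_strict _ _ (PySem.Set.nodup_ofList _) (fun a b hh => hh)
    -- (b1) the k0-filter of t :: rest is exactly the first group
    have hfil0 : (t :: rest).filter (fun u => decide (pvKey u = (t.1, t.2.1)))
        = t :: rest.takeWhile (fun u => decide ((u.1, u.2.1) = (t.1, t.2.1))) := by
      rw [List.filter_cons_of_pos (by simp only [decide_eq_true_eq]; rfl)]
      congr 1
      conv_lhs => rw [hsplit]
      rw [List.filter_append,
        List.filter_eq_self.mpr (fun u hu => by simp only [decide_eq_true_eq]; exact htW u hu),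
        List.filter_eq_nil_iff.mpr (fun u hu => by simp only [decide_eq_true_eq]; exact hdWne u hu),
        List.append_nil]
    -- (b2) for any other key the filter ignores the first group
    have hfil : ∀ k : Int × Int, k ≠ (t.1, t.2.1) →
        (t :: rest).filter (fun u => decide (pvKey u = k))
          = (rest.dropWhile (fun u => decide ((u.1, u.2.1) = (t.1, t.2.1)))).filter
              (fun u => decide (pvKey u = k)) := by
      intro k hk
      rw [List.filter_cons_of_neg (by
        simp only [decide_eq_true_eq]
        exact fun hh : pvKey t = k => hk (hh.symm))]
      conv_lhs => rw [hsplit]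
      rw [List.filter_append,
        List.filter_eq_nil_iff.mpr (fun u hu => by
          simp only [decide_eq_true_eq, htW u hu]
          exact fun hh => hk hh.symm),
        List.nil_append]
    -- (c) the dedup loop over the first group's days is its sorted distinct days
    have hdays : (t :: rest.takeWhile (fun u => decide ((u.1, u.2.1) = (t.1, t.2.1)))).foldl
          (fun days u => if days = [] ∨ days.getLast? ≠ some u.2.2 then days ++ [u.2.2] else days) []
        = PySem.List.sorted (PySem.Set.ofList
            ((t :: rest.takeWhile (fun u => decide ((u.1, u.2.1) = (t.1, t.2.1)))).map
              (fun u => u.2.2))) (fun x => x) false := by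
      have hgrp : (t :: rest.takeWhile (fun u => decide ((u.1, u.2.1) = (t.1, t.2.1)))).Pairwise
          (fun a b => toLex (a.1, toLex (a.2.1, a.2.2)) ≤ toLex (b.1, toLex (b.2.1, b.2.2))) :=
        List.Pairwise.sublist ((List.takeWhile_sublist _).cons₂ t) h
      have hkeq : ∀ u ∈ t :: rest.takeWhile (fun u => decide ((u.1, u.2.1) = (t.1, t.2.1))),
          pvKey u = (t.1, t.2.1) := by
        intro u hu
        rcases List.mem_cons.mp hu with rfl | hu
        · rfl
        · exact htW u hu
      have hdle : ((t :: rest.takeWhile (fun u => decide ((u.1, u.2.1) = (t.1, t.2.1)))).map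
          (fun u => u.2.2)).Pairwise (· ≤ ·) := by
        rw [List.pairwise_map]
        refine hgrp.imp_of_mem ?_
        intro a b ha hb hab
        exact pv_le_day a b hab ((hkeq a ha).trans (hkeq b hb).symm)
      rw [pv_foldl_tripleday]
      exact pv_dedup_eq_sorted_set _ hdle
    -- assemble
    rw [pvChunk]
    unfold pvCanon
    rw [hkeys, List.map_cons]
    congr 1
    · rw [hfil0, hdays]
      rfl
    · rw [pvChunk_eq (rest.dropWhile (fun u => decide ((u.1, u.2.1) = (t.1, t.2.1)))) hdWsorted]
      unfold pvCanon
      refine (List.map_congr_left (fun k hkmem => ?_)).symm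
      have hkne : k ≠ (t.1, t.2.1) := by
        rw [PySem.List.mem_sorted, PySem.Set.mem_ofList] at hkmem
        obtain ⟨u, hu, rfl⟩ := List.mem_map.mp hkmem
        exact hdWne u hu
      rw [hfil k hkne]
termination_by L.length
decreasing_by
  simp only [List.length_cons]
  exact Nat.lt_succ_of_le (List.length_dropWhile_le _ _)

-- B computes the canonical form
theorem pvB_eq (l : List (Int × Int × Int)) (h : l ≠ []) :
    format_output_ymd_alt l = some (PySem.Str.join "\n" (pvCanon l)) := by
  unfold format_output_ymd_alt
  rw [if_neg h]
  rw [pvChunk_eq _ (PySem.List.sorted_pairwise l _),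
    pvCanon_perm _ _ (PySem.List.sorted_perm l _ false)]

-- ===== VERDICT (by name: the statement is the Claim_ definition above) =====
theorem format_output_ymd_spec : Claim_equal_format_output_ymd := by
  intro l _
  unfold Spec_format_output_ymd
  by_cases h : l = []
  · subst h; rfl
  · rw [pvA_eq l h, pvB_eq l h]
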